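-- pv_equiv track=rewrite | github.com/alexandre-barroso/tina | neuron_activity.py | create_syllable_pattern
-- ===== SOURCE A (Python) =====
-- def create_syllable_pattern(word):
--     """Create a plausible syllable pattern for a word."""
--     # In Portuguese, syllables typically follow consonant-vowel patterns
--     pattern = []
--     vowels = "aeiouáàâãéêíóôõú"
--     in_syllable = False
--
--     for char in word.lower():
--         if char in vowels:
--             if not in_syllable:
--                 pattern.append('1')  # Mark start of syllable
--                 in_syllable = True
--             else:
--                 pattern.append('0')
--         else:
--             pattern.append('0')
--             # End syllable after consonant if not at start
--             if in_syllable and pattern: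
--                 in_syllable = False
--
--     # Ensure we have at least one syllable
--     if '1' not in pattern and pattern:
--         pattern[0] = '1'
--
--     return "".join(pattern)
-- ===== SOURCE B (Python) =====
-- def create_syllable_pattern(word):
--     """Create a plausible syllable pattern for a word."""
--     w = word.lower()
--     vowels = "aeiouáàâãéêíóôõú"
--     # Decompose the word into maximal runs of same vowel-class characters:
--     # a vowel run contributes '1' followed by zeros (one syllable start per
--     # vowel group), a consonant run contributes all zeros.
--     chunks = []
--     i = 0
--     n = len(w)
--     while i < n:
--         isv = w[i] in vowels
--         j = i + 1
--         while j < n and (w[j] in vowels) == isv: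
--             j += 1
--         chunks.append('1' + '0' * (j - i - 1) if isv else '0' * (j - i))
--         i = j
--     pat = ''.join(chunks)
--     if w and '1' not in pat:
--         pat = '1' + pat[1:]
--     return pat
-- ===== Notes on version B (the rewrite author's own statement) =====
-- stated objective: alternative
-- what changed: Replaces A's per-character in_syllable state machine with a run decomposition: B scans the word as maximal runs of same vowel-class characters and emits a closed-form chunk per run ('1'+zeros for a vowel run, zeros for a consonant run), then joins the chunks, keeping the same no-vowel guard.
import Mathlib
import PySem

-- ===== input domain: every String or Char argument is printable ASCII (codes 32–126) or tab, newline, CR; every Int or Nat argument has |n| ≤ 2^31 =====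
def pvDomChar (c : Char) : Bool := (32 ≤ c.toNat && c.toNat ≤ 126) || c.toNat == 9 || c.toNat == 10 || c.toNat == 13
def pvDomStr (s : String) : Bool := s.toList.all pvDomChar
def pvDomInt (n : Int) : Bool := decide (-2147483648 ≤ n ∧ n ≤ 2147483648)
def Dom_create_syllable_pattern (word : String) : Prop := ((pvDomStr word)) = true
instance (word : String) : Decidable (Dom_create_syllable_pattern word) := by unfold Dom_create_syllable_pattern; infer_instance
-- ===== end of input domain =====

-- B replaces A's per-character in_syllable state machine by a run decomposition:
-- it splits the word into maximal same-vowel-class runs and emits a closed-form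
-- chunk per run (objective: alternative, same cost).

-- ===== PORT A =====
def pvVowels : List Char := "aeiouáàâãéêíóôõú".toList

-- the for-loop of A, state (pattern, in_syllable)
def pvALoop : List Char → List Char → Bool → List Char
  | [], pattern, _ => pattern
  | c :: rest, pattern, insyl =>
    if pvVowels.contains c then
      if !insyl then pvALoop rest (pattern ++ ['1']) true
      else pvALoop rest (pattern ++ ['0']) true
    else
      let pattern' := pattern ++ ['0']
      pvALoop rest pattern' (if insyl && pattern' ≠ [] then false else insyl)

def create_syllable_pattern (word : String) : String :=
  let pattern := pvALoop (PySem.Str.lower word).toList [] false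
  let pattern := if !pattern.contains '1' && pattern ≠ [] then pattern.set 0 '1' else pattern
  String.mk pattern

-- ===== PORT B =====
-- B's outer while-loop over maximal runs: the inner while scanning j is the
-- takeWhile/dropWhile split of the remaining suffix; each run yields its chunk.
def pvEmit : List Char → List Char
  | [] => []
  | c :: rest =>
    let isv := pvVowels.contains c
    let run := rest.takeWhile (fun d => pvVowels.contains d == isv)
    let chunk := (if isv then '1' else '0') :: List.replicate run.length '0'
    chunk ++ pvEmit (rest.dropWhile (fun d => pvVowels.contains d == isv))
termination_by cs => cs.length
decreasing_by
  simp only [List.length_cons]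
  exact Nat.lt_succ_of_le (List.length_dropWhile_le _ _)

def create_syllable_pattern_alt (word : String) : String :=
  let w := (PySem.Str.lower word).toList
  let pat := pvEmit w
  let pat := if w ≠ [] && !pat.contains '1' then '1' :: pat.drop 1 else pat
  String.mk pat

-- ===== PRECONDITION & SPEC =====
def Spec_create_syllable_pattern (word : String) (out : String) : Prop := out = create_syllable_pattern_alt word
instance (word : String) (out : String) : Decidable (Spec_create_syllable_pattern word out) := by unfold Spec_create_syllable_pattern; infer_instance

-- ===== CLAIM (what is proved, stated in full; the proofs are below) =====
def Claim_equal_create_syllable_pattern : Prop := ∀ (word : String), Dom_create_syllable_pattern word → Spec_create_syllable_pattern word (create_syllable_pattern word)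

-- ===== LEMMAS AND PROOFS =====

-- character-level spec: bit list of cs given whether the previous char was a vowel
def pvBits : List Char → Bool → List Char
  | [], _ => []
  | c :: rest, pv =>
    (if pvVowels.contains c && !pv then '1' else '0') :: pvBits rest (pvVowels.contains c)

theorem pvALoop_eq (cs : List Char) : ∀ (pat : List Char) (pv : Bool),
    pvALoop cs pat pv = pat ++ pvBits cs pv := by
  induction cs with
  | nil => intro pat pv; simp [pvALoop, pvBits]
  | cons c rest ih =>
    intro pat pv
    by_cases hv : c ∈ pvVowels
    · cases pv <;> simp [pvALoop, pvBits, hv, ih]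
    · cases pv <;> simp [pvALoop, pvBits, hv, ih]

theorem pvBits_nil_iff (cs : List Char) (pv : Bool) : pvBits cs pv = [] ↔ cs = [] := by
  cases cs <;> simp [pvBits]

-- a uniform run of class isv contributes zeros and carries isv
theorem pvBits_run (isv : Bool) (run : List Char)
    (h : ∀ d ∈ run, pvVowels.contains d = isv) (rest : List Char) :
    pvBits (run ++ rest) isv = List.replicate run.length '0' ++ pvBits rest isv := by
  induction run with
  | nil => simp
  | cons d t ih =>
    have hd : pvVowels.contains d = isv := h d (List.mem_cons_self ..)
    simp only [List.cons_append, pvBits, hd, List.length_cons, List.replicate_succ,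
      Bool.and_not_self, Bool.false_eq_true, if_false]
    exact congrArg _ (ih (fun x hx => h x (List.mem_cons_of_mem _ hx)))

-- at a run boundary the carry does not matter
theorem pvBits_boundary (isv : Bool) (cs : List Char)
    (h : ∀ d, cs.head? = some d → pvVowels.contains d = !isv) :
    pvBits cs isv = pvBits cs false := by
  cases cs with
  | nil => rfl
  | cons d t =>
    cases isv with
    | false => rfl
    | true =>
      have hd' : d ∉ pvVowels := by simpa using h d rfl
      simp [pvBits, hd']

theorem pvEmit_eq (cs : List Char) : pvEmit cs = pvBits cs false := by
  induction cs using pvEmit.induct with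
  | case1 => simp [pvEmit, pvBits]
  | case2 c rest _isv ih =>
    have hsplit : rest = rest.takeWhile (fun d => pvVowels.contains d == pvVowels.contains c)
        ++ rest.dropWhile (fun d => pvVowels.contains d == pvVowels.contains c) :=
      (List.takeWhile_append_dropWhile ..).symm
    have hrun : ∀ d ∈ rest.takeWhile (fun d => pvVowels.contains d == pvVowels.contains c),
        pvVowels.contains d = pvVowels.contains c := by
      intro d hd
      simpa using List.mem_takeWhile_imp hd
    have hbd : ∀ d, (rest.dropWhile (fun d => pvVowels.contains d == pvVowels.contains c)).head?
        = some d → pvVowels.contains d = !(pvVowels.contains c) := by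
      intro d hd
      have h2 := List.head?_dropWhile_not
        (p := fun d => pvVowels.contains d == pvVowels.contains c) (l := rest)
      rw [hd] at h2
      simpa [Bool.eq_not_iff] using h2
    simp only [show _isv = pvVowels.contains c from rfl] at ih
    rw [pvEmit, ih]
    conv_rhs => rw [hsplit]
    simp only [pvBits, Bool.not_false, Bool.and_true]
    rw [pvBits_run (pvVowels.contains c) _ hrun, pvBits_boundary _ _ hbd]
    cases hc : pvVowels.contains c <;> simp

-- ===== VERDICT (by name: the statement is the Claim_ definition above) =====
theorem create_syllable_pattern_spec : Claim_equal_create_syllable_pattern := by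
  intro word _
  unfold Spec_create_syllable_pattern create_syllable_pattern create_syllable_pattern_alt
  simp only [pvALoop_eq, List.nil_append, pvEmit_eq]
  generalize (PySem.Str.lower word).toList = cs
  by_cases h : cs = []
  · simp [h, pvBits]
  · have hne : pvBits cs false ≠ [] := by simpa [pvBits_nil_iff] using h
    by_cases h1 : '1' ∈ pvBits cs false
    · simp [h, hne, h1]
    · cases hb : pvBits cs false with
      | nil => exact absurd hb hne
      | cons x t => simp [h, hb ▸ h1]
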